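-- pv_equiv track=rewrite | github.com/anyachai/CS324EAssignment3 | extract_words.py | allWordsListMaker
-- ===== SOURCE A (Python) =====
-- def allWordsListMaker(linesList):
--     # Make wordlist
--     wordlist = []
--
--     #Traverse lines
--     for line in linesList:
--         #New word
--         word = ''
--         for x in range(len(line)):
--             #Pull character from current line
--             character = line[x]
--
--             #If uppercase character, change it to lowercase
--             if (64 < ord(line[x]) < 91):
--                 character = chr(ord(line[x]) + 32)
--
--             #If lowercase character, add it to the current word, otherwise
--             #   add current word to the allword list and reset the current word
--             if ((96 < ord(character) < 123)):
--                 word = word + character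
--
--             else:
--                 # Only add a word to the current list if it's longer than 2 characters
--                 #   or it is the word a.
--                 if (word != '') and ((len(word) > 2) or (word == "a")):
--                     wordlist.append(word)
--                 word = ''
--
--         # Add last word on line to the wordlist
--         if (word != '') and ((len(word) > 2) or (word == "a")):
--             wordlist.append(word)
--
--     # Return the wordlist
--     return wordlist
-- ===== SOURCE B (Python) =====
-- def allWordsListMaker(linesList):
--     # Two-pointer tokenizer: scan each line for maximal ASCII-letter runs,
--     # lowercase the whole slice at once, keep it if len > 2 or it is 'a'.
--     wordlist = []
--     for line in linesList:
--         i, n = 0, len(line)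
--         while i < n:
--             if not (line[i].isascii() and line[i].isalpha()):
--                 i += 1
--                 continue
--             j = i + 1
--             while j < n and line[j].isascii() and line[j].isalpha():
--                 j += 1
--             word = line[i:j].lower()
--             if len(word) > 2 or word == 'a':
--                 wordlist.append(word)
--             i = j
--     return wordlist
-- ===== Notes on version B (the rewrite author's own statement) =====
-- stated objective: alternative
-- what changed: Replaces the per-character lowercase-then-accumulate state machine (with its duplicated end-of-line flush) by a two-pointer scan that slices out each maximal ASCII-letter run, lowercases the slice once, and filters it.
import Mathlib
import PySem

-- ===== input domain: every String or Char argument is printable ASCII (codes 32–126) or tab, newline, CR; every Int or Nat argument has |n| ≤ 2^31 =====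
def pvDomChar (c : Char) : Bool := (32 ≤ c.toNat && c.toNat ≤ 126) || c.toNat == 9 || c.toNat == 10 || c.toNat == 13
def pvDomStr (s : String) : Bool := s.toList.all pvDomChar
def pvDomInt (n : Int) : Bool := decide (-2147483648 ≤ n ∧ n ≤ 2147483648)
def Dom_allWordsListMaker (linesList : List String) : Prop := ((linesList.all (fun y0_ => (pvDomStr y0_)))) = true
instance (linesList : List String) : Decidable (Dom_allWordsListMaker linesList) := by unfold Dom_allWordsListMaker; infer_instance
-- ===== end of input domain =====

-- B replaces A's per-character lowercase-then-accumulate state machine by a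
-- two-pointer scan over maximal ASCII-letter runs (slice, lower once, filter);
-- same cost, different structure.


-- ===== PORT A =====
-- one step of A's inner character loop; state = (wordlist, current word as chars)
def pvAStep (st : List String × List Char) (c : Char) : List String × List Char :=
  -- character = chr(ord(c)+32) if uppercase else c
  let character := if 64 < c.toNat ∧ c.toNat < 91 then Char.ofNat (c.toNat + 32) else c
  if 96 < character.toNat ∧ character.toNat < 123 then
    (st.1, st.2 ++ [character])
  else
    (if st.2 ≠ [] ∧ (2 < st.2.length ∨ st.2 = ['a']) then st.1 ++ [String.ofList st.2] else st.1, [])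

-- one iteration of A's outer loop: scan the line, then flush the last word
def pvALine (wordlist : List String) (line : String) : List String :=
  let st := line.toList.foldl pvAStep (wordlist, [])
  if st.2 ≠ [] ∧ (2 < st.2.length ∨ st.2 = ['a']) then st.1 ++ [String.ofList st.2] else st.1

def allWordsListMaker (linesList : List String) : List String :=
  linesList.foldl pvALine []

-- ===== PORT B =====
-- line[i].isascii() and line[i].isalpha()
def pvBAlpha (c : Char) : Bool := decide (c.toNat ≤ 127) && PySem.Chars.isalpha c

-- B's while-loop over one line: skip a non-letter, or slice out the maximal
-- letter run (i..j), lowercase it once, filter, continue after the run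
def pvBLine : List Char → List String
  | [] => []
  | c :: cs =>
    if pvBAlpha c then
      let run := c :: cs.takeWhile pvBAlpha
      let rest := cs.dropWhile pvBAlpha
      let word := String.ofList (PySem.Chars.lower run)
      (if 2 < PySem.Str.len word ∨ word = "a" then [word] else []) ++ pvBLine rest
    else
      pvBLine cs
termination_by cs => cs.length
decreasing_by
  · simpa [Nat.lt_succ_iff] using List.length_dropWhile_le pvBAlpha cs
  · simp

def allWordsListMaker_alt (linesList : List String) : List String :=
  linesList.foldl (fun wordlist line => wordlist ++ pvBLine line.toList) []

-- ===== PRECONDITION & SPEC =====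
def Spec_allWordsListMaker (linesList : List String) (out : List String) : Prop := out = allWordsListMaker_alt linesList
instance (linesList : List String) (out : List String) : Decidable (Spec_allWordsListMaker linesList out) := by unfold Spec_allWordsListMaker; infer_instance

-- ===== CLAIM (what is proved, stated in full; the proofs are below) =====
def Claim_equal_allWordsListMaker : Prop := ∀ (linesList : List String), Dom_allWordsListMaker linesList → Spec_allWordsListMaker linesList (allWordsListMaker linesList)

-- ===== LEMMAS AND PROOFS =====

-- A's flush of the pending word, as a standalone function
def pvFlush (st : List String × List Char) : List String :=
  if st.2 ≠ [] ∧ (2 < st.2.length ∨ st.2 = ['a']) then st.1 ++ [String.ofList st.2] else st.1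

theorem pvALine_eq_flush (wl : List String) (line : String) :
    pvALine wl line = pvFlush (line.toList.foldl pvAStep (wl, [])) := rfl

theorem isupper_iff (c : Char) : PySem.Chars.isupper c = true ↔ (64 < c.toNat ∧ c.toNat < 91) := by
  simp only [PySem.Chars.isupper, Bool.and_eq_true, decide_eq_true_eq, Char.le_def,
    UInt32.le_iff_toNat_le]
  exact ⟨fun ⟨a, b⟩ => ⟨a, Nat.lt_succ_of_le b⟩, fun ⟨a, b⟩ => ⟨a, Nat.lt_succ_iff.mp b⟩⟩

theorem islower_iff (c : Char) : PySem.Chars.islower c = true ↔ (96 < c.toNat ∧ c.toNat < 123) := by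
  simp only [PySem.Chars.islower, Bool.and_eq_true, decide_eq_true_eq, Char.le_def,
    UInt32.le_iff_toNat_le]
  exact ⟨fun ⟨a, b⟩ => ⟨a, Nat.lt_succ_of_le b⟩, fun ⟨a, b⟩ => ⟨a, Nat.lt_succ_iff.mp b⟩⟩

theorem pvBAlpha_eq_isalpha (c : Char) : pvBAlpha c = PySem.Chars.isalpha c := by
  rcases h : PySem.Chars.isalpha c with _ | _
  · simp [pvBAlpha, h]
  · have : c.toNat ≤ 127 := by
      rcases (by simpa [PySem.Chars.isalpha] using h : _ ∨ _) with hu | hl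
      · exact le_of_lt (lt_of_lt_of_le ((isupper_iff c).mp hu).2 (by norm_num))
      · exact le_of_lt (lt_of_lt_of_le ((islower_iff c).mp hl).2 (by norm_num))
    simp [pvBAlpha, h, this]

theorem toNat_ofNat_add32 (c : Char) (h1 : 64 < c.toNat) (h2 : c.toNat < 91) :
    (Char.ofNat (c.toNat + 32)).toNat = c.toNat + 32 := by
  have hv : (c.toNat + 32).isValidChar := by constructor; omega
  rw [Char.toNat_ofNat]; simp [hv]

-- an alpha character extends the current word with its lowercased form
theorem step_alpha (acc : List String) (w : List Char) (c : Char) (h : pvBAlpha c = true) :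
    pvAStep (acc, w) c = (acc, w ++ [PySem.Chars.lowerChar c]) := by
  have h' : PySem.Chars.isalpha c = true := by rw [← pvBAlpha_eq_isalpha]; exact h
  have halpha : PySem.Chars.isupper c = true ∨ PySem.Chars.islower c = true := by
    simpa [PySem.Chars.isalpha] using h'
  rcases halpha with hu | hl
  · obtain ⟨h1, h2⟩ := (isupper_iff c).mp hu
    simp only [pvAStep, PySem.Chars.lowerChar, hu, if_pos (And.intro h1 h2), if_true]
    rw [if_pos]
    rw [toNat_ofNat_add32 c h1 h2]; omega
  · obtain ⟨h1, h2⟩ := (islower_iff c).mp hl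
    have hnu : ¬ (64 < c.toNat ∧ c.toNat < 91) := by omega
    have hnu' : PySem.Chars.isupper c ≠ true := fun hc => hnu ((isupper_iff c).mp hc)
    simp only [pvAStep, PySem.Chars.lowerChar, if_neg hnu, if_neg hnu']
    rw [if_pos ⟨h1, h2⟩]

-- a non-alpha character flushes the current word
theorem step_nonalpha (acc : List String) (w : List Char) (c : Char) (h : pvBAlpha c = false) :
    pvAStep (acc, w) c = (pvFlush (acc, w), []) := by
  have halpha : PySem.Chars.isupper c = false ∧ PySem.Chars.islower c = false := by
    have h' : PySem.Chars.isalpha c = false := by rw [← pvBAlpha_eq_isalpha]; exact h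
    simpa [PySem.Chars.isalpha] using h'
  have hnu : ¬ (64 < c.toNat ∧ c.toNat < 91) := fun hc => by
    simp [(isupper_iff c).mpr hc] at halpha
  have hnl : ¬ (96 < c.toNat ∧ c.toNat < 123) := fun hc => by
    simp [(islower_iff c).mpr hc] at halpha
  simp only [pvAStep, if_neg hnu, if_neg hnl, pvFlush]

-- folding A's step over an all-alpha run appends the lowercased run
theorem fold_run (run : List Char) (h : ∀ c ∈ run, pvBAlpha c = true) :
    ∀ (acc : List String) (w : List Char),
      run.foldl pvAStep (acc, w) = (acc, w ++ run.map PySem.Chars.lowerChar) := by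
  induction run with
  | nil => intro acc w; simp
  | cons c cs ih =>
    intro acc w
    rw [List.foldl_cons, step_alpha acc w c (h c (List.mem_cons_self))]
    rw [ih (fun d hd => h d (List.mem_cons_of_mem c hd))]
    simp

-- the kept-word condition agrees between A (on char lists) and B (on strings)
theorem keep_iff (l : List Char) (hne : l ≠ []) :
    pvFlush (acc, l) = acc ++ (if 2 < PySem.Str.len (String.ofList l) ∨ String.ofList l = "a" then [String.ofList l] else []) := by
  have hlen : PySem.Str.len (String.ofList l) = (l.length : Int) := by
    simp only [PySem.Str.len]
    rw [show (String.ofList l).toList = l from Eq.symm (String.ofList_eq.mp rfl)]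
  have hmka : String.ofList l = "a" ↔ l = ['a'] := by
    constructor
    · intro h
      have := congrArg String.toList h
      rwa [show (String.ofList l).toList = l from Eq.symm (String.ofList_eq.mp rfl)] at this
    · intro h; rw [h]
  by_cases hk : 2 < l.length ∨ l = ['a']
  · rw [pvFlush, if_pos ⟨hne, hk⟩, if_pos (show 2 < PySem.Str.len (String.ofList l) ∨ String.ofList l = "a" by
      rw [hlen, hmka]; exact_mod_cast hk)]
  · rw [pvFlush, if_neg (fun hc => hk hc.2), if_neg (by rw [hlen, hmka]; exact_mod_cast hk),
      List.append_nil]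

-- main per-line invariant: A's scan+flush from any accumulator = accumulator ++ B's tokens
theorem line_main : ∀ (n : Nat) (cs : List Char), cs.length ≤ n → ∀ (acc : List String),
    pvFlush (cs.foldl pvAStep (acc, [])) = acc ++ pvBLine cs := by
  intro n
  induction n with
  | zero =>
    intro cs hcs acc
    have : cs = [] := List.eq_nil_of_length_eq_zero (Nat.le_zero.mp hcs)
    subst this
    simp [pvBLine, pvFlush]
  | succ n ih =>
    intro cs hcs acc
    match cs with
    | [] => simp [pvBLine, pvFlush]
    | c :: cs' =>
      rcases h : pvBAlpha c with _ | _
      · -- non-alpha head: flush the (empty) word, recurse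
        rw [List.foldl_cons, step_nonalpha acc [] c h]
        have : pvFlush (acc, ([] : List Char)) = acc := by simp [pvFlush]
        rw [this]
        rw [ih cs' (Nat.le_of_succ_le_succ (by simpa using hcs)) acc]
        rw [pvBLine, if_neg (by simp [h])]
      · -- alpha head: consume the maximal run, flush it, recurse on the rest
        have hsplit : cs' = cs'.takeWhile pvBAlpha ++ cs'.dropWhile pvBAlpha :=
          (List.takeWhile_append_dropWhile).symm
        have hrun : ∀ d ∈ c :: cs'.takeWhile pvBAlpha, pvBAlpha d = true := by
          intro d hd
          rcases List.mem_cons.mp hd with h1 | h1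
          · exact h1 ▸ h
          · exact List.mem_takeWhile_imp h1
        have hfold : (c :: cs').foldl pvAStep (acc, []) =
            (cs'.dropWhile pvBAlpha).foldl pvAStep
              (acc, (c :: cs'.takeWhile pvBAlpha).map PySem.Chars.lowerChar) := by
          conv_lhs => rw [show c :: cs' = (c :: cs'.takeWhile pvBAlpha) ++ cs'.dropWhile pvBAlpha by
            rw [List.cons_append]; exact congrArg (c :: ·) hsplit]
          rw [List.foldl_append, fold_run _ hrun acc []]
          simp
        rw [hfold]
        have hword : String.ofList (PySem.Chars.lower (c :: cs'.takeWhile pvBAlpha)) =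
            String.ofList ((c :: cs'.takeWhile pvBAlpha).map PySem.Chars.lowerChar) := by
          rfl
        rw [pvBLine, if_pos h]
        match hrest : cs'.dropWhile pvBAlpha with
        | [] =>
          rw [List.foldl_nil]
          rw [keep_iff _ (by simp)]
          simp [pvBLine, hword]
        | e :: rest =>
          have he : pvBAlpha e = false := by
            have := List.head?_dropWhile_not pvBAlpha cs'
            rw [hrest] at this
            simpa using this
          rw [List.foldl_cons, step_nonalpha _ _ e he]
          have hlen1 : (cs'.dropWhile pvBAlpha).length ≤ cs'.length :=
            List.length_dropWhile_le _ _
          have hlen : rest.length ≤ n := by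
            rw [hrest] at hlen1
            simp only [List.length_cons] at hlen1 hcs
            omega
          rw [ih rest hlen]
          rw [keep_iff _ (by simp)]
          have hB : pvBLine (e :: rest) = pvBLine rest := by
            rw [pvBLine, if_neg (by simp [he])]
          simp only [hB, hword, List.append_assoc]
  
theorem pvALine_eq (wl : List String) (line : String) :
    pvALine wl line = wl ++ pvBLine line.toList := by
  rw [pvALine_eq_flush]
  exact line_main line.toList.length line.toList le_rfl wl

theorem folds_eq : ∀ (ls : List String) (acc : List String),
    ls.foldl pvALine acc = ls.foldl (fun wordlist line => wordlist ++ pvBLine line.toList) acc := by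
  intro ls
  induction ls with
  | nil => intro acc; rfl
  | cons l ls ih =>
    intro acc
    rw [List.foldl_cons, List.foldl_cons, pvALine_eq, ih]

-- ===== VERDICT (by name: the statement is the Claim_ definition above) =====
theorem allWordsListMaker_spec : Claim_equal_allWordsListMaker := by
  intro linesList _
  show allWordsListMaker linesList = allWordsListMaker_alt linesList
  unfold allWordsListMaker allWordsListMaker_alt
  exact folds_eq linesList []
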